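-- pv_equiv track=rewrite | github.com/lasercata/wireless_network_project | code/src/binary_transformation.py | bitToByte
-- ===== SOURCE A (Python) =====
-- import math
--
-- def bitToByte(array):
--     """Convert a binary array into a Byte arrays"""
--     mess = []
--     nbWord = math.floor(len(array) / 8)
--     for n in range(nbWord):
--         w = 0
--         for k in range(8):
--             w += array[ n * 8 + k ] * 2**k
--         mess.append(w)
--     return mess
-- ===== SOURCE B (Python) =====
-- def _value(bits):
--     """Little-endian value of a bit list, recursively: v(b::t) = b + 2*v(t)."""
--     return bits[0] + 2 * _value(bits[1:]) if bits else 0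
--
--
-- def bitToByte(array):
--     """Convert a binary array into a Byte arrays"""
--     if len(array) < 8:
--         return []
--     return [_value(array[:8])] + bitToByte(array[8:])
-- ===== Notes on version B (the rewrite author's own statement) =====
-- stated objective: alternative
-- what changed: Replaces the nested index loops over range(nbWord)/range(8) with power weights 2**k by structural recursion that consumes the list: peel the first 8 elements, value them by the recursive identity v(b::t)=b+2*v(t), and recurse on the rest; no indexing, no ranges, no powers.
import Mathlib
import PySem

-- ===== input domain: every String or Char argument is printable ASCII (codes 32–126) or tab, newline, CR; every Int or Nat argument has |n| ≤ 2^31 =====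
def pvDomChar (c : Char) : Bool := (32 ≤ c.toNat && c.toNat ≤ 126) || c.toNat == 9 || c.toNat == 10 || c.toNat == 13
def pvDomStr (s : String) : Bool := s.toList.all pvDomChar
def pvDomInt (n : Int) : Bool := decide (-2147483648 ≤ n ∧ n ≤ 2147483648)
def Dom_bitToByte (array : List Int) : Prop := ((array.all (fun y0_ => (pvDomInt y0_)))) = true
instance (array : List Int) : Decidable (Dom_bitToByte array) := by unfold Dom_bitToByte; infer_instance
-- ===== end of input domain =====

-- B replaces A's nested index loops with 2**k weights by structural recursion consuming the
-- list (peel 8, value them by v(b::t) = b + 2*v(t), recurse); alternative decomposition, same cost.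

-- ===== PORT A =====
-- math.floor(len(array)/8) is exact integer floor division here; every index n*8+k is in
-- range, so pyGetD with default 0 is exact; 2**k with k ≥ 0 is 2 ^ k.toNat.
def bitToByte (array : List Int) : List Int :=
  (PySem.List.pyRange 0 (PySem.Int.floordiv (PySem.List.len array) 8) 1).foldl
    (fun mess n =>
      mess ++ [(PySem.List.pyRange 0 8 1).foldl
        (fun w k => w + PySem.List.pyGetD array (n * 8 + k) 0 * 2 ^ k.toNat) 0]) []

-- ===== PORT B =====
-- _value: bits[0] + 2*_value(bits[1:]) if bits else 0
def pvValue : List Int → Int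
  | [] => 0
  | b :: t => b + 2 * pvValue t

-- array[:8] / array[8:] with nonnegative in-range bounds are exactly take 8 / drop 8
def bitToByte_alt (array : List Int) : List Int :=
  if array.length < 8 then []
  else pvValue (array.take 8) :: bitToByte_alt (array.drop 8)
termination_by array.length
decreasing_by simp; omega

-- ===== PRECONDITION & SPEC =====
def Spec_bitToByte (array : List Int) (out : List Int) : Prop := out = bitToByte_alt array
instance (array : List Int) (out : List Int) : Decidable (Spec_bitToByte array out) := by unfold Spec_bitToByte; infer_instance

-- ===== CLAIM (what is proved, stated in full; the proofs are below) =====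
def Claim_equal_bitToByte : Prop := ∀ (array : List Int), Dom_bitToByte array → Spec_bitToByte array (bitToByte array)

-- ===== LEMMAS AND PROOFS =====

-- The recursive value equals the little-endian weighted sum.
lemma pvValue_eq_sum (c : List Int) :
    pvValue c = ((List.range c.length).map (fun k => c.getD k 0 * 2 ^ k)).sum := by
  induction c with
  | nil => simp [pvValue]
  | cons x t ih =>
    rw [List.length_cons, List.range_succ_eq_map, List.map_cons, List.sum_cons, List.map_map]
    simp only [Function.comp_def, List.getD_cons_succ, List.getD_cons_zero, pow_succ, pow_zero,
      mul_one, ← mul_assoc, List.sum_map_mul_right]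
    simp only [pvValue, ih]
    ring

-- a fold accumulating sums is the sum of the mapped list
lemma foldl_add_eq_sum (l : List Nat) (f : Nat → Int) :
    l.foldl (fun w k => w + f k) 0 = (l.map f).sum := by
  induction l using List.reverseRecOn with
  | nil => simp
  | append_singleton t x ih => simp [ih]

-- one word: A's inner power-sum loop equals B's recursive value of the 8-element chunk
lemma word_eq (array : List Int) (m : Nat) (h : m * 8 + 8 ≤ array.length) :
    (PySem.List.pyRange 0 8 1).foldl
        (fun w k => w + PySem.List.pyGetD array ((m : Int) * 8 + k) 0 * 2 ^ k.toNat) 0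
      = pvValue ((array.drop (m * 8)).take 8) := by
  have hlen : ((array.drop (m * 8)).take 8).length = 8 := by
    simp [List.length_take, List.length_drop]
    omega
  rw [pvValue_eq_sum, hlen]
  rw [PySem.List.pyRange_one, List.foldl_map, foldl_add_eq_sum]
  have h8 : ((8 : Int) - 0).toNat = 8 := by decide
  rw [h8]
  apply congrArg List.sum
  apply List.map_congr_left
  intro k hk
  rw [List.mem_range] at hk
  simp only [zero_add, Int.toNat_natCast]
  have h1 : (m : Int) * 8 + (k : Int) = ((m * 8 + k : Nat) : Int) := by push_cast; ring
  rw [h1, PySem.List.pyGetD_natCast]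
  congr 1
  rw [List.getD_eq_getElem?_getD, List.getD_eq_getElem?_getD]
  rw [List.getElem?_take_of_lt hk, List.getElem?_drop]

-- B's recursion characterised as a map over the word indices
lemma alt_eq_map (array : List Int) :
    bitToByte_alt array
      = (List.range (array.length / 8)).map (fun m => pvValue ((array.drop (m * 8)).take 8)) := by
  induction array using bitToByte_alt.induct with
  | case1 array hlt =>
    rw [bitToByte_alt, if_pos hlt, Nat.div_eq_of_lt hlt]
    simp
  | case2 array hge ih =>
    rw [bitToByte_alt, if_neg hge]
    have h8 : 8 ≤ array.length := by omega
    have hdiv : array.length / 8 = (array.length - 8) / 8 + 1 := by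
      omega
    rw [hdiv, List.range_succ_eq_map, List.map_cons, List.map_map]
    have hdl : (array.drop 8).length = array.length - 8 := by simp
    rw [ih, hdl]
    congr 1
    refine List.map_congr_left fun a _ => ?_
    simp only [Function.comp_def, List.drop_drop, Nat.succ_eq_add_one]
    have he : 8 + a * 8 = (a + 1) * 8 := by ring
    rw [he]

-- ===== VERDICT (by name: the statement is the Claim_ definition above) =====
theorem bitToByte_spec : Claim_equal_bitToByte := by
  intro array _
  unfold Spec_bitToByte bitToByte
  rw [PySem.List.foldl_append_singleton_eq_map, alt_eq_map]
  simp only [PySem.List.len_eq]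
  have hnb : PySem.Int.floordiv (array.length : Int) 8 = ((array.length / 8 : Nat) : Int) := by
    exact_mod_cast PySem.Int.floordiv_natCast array.length 8
  rw [hnb, PySem.List.pyRange_one 0 ((array.length / 8 : Nat) : Int), List.map_map,
    List.nil_append]
  have h0 : (((array.length / 8 : Nat) : Int) - 0).toNat = array.length / 8 := by omega
  rw [h0]
  apply List.map_congr_left
  intro m hm
  rw [List.mem_range] at hm
  simp only [Function.comp_def, zero_add]
  have hb : m * 8 + 8 ≤ array.length := by omega
  exact word_eq array m hb
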